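-- pv_equiv track=rewrite | github.com/Bruhtek/agh-wdi | zestawy/01 - petle/z52.py | combine_numbers
-- ===== SOURCE A (Python) =====
-- def combine_numbers(a, b, mask)->int:
--     result = 0
--     digit_count = 0
--     requested_count = len(str(a)) + len(str(b))
--
--     while digit_count != requested_count:
--         if mask % 2 == 0:
--             result += (a % 10) * (10 ** digit_count)
--             a //= 10
--         else:
--             result += (b % 10) * (10 ** digit_count)
--             b //= 10
--         mask //= 2
--         digit_count += 1
--
--     return result
-- ===== SOURCE B (Python) =====
-- def combine_numbers(a, b, mask) -> int:
--     n = len(str(a)) + len(str(b))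
--     result = 0
--     for i in range(n - 1, -1, -1):
--         k = sum(1 for j in range(i) if (mask >> j) & 1)  # digits drawn from b below position i
--         if (mask >> i) & 1:
--             d = (b // 10 ** k) % 10
--         else:
--             d = (a // 10 ** (i - k)) % 10
--         result = result * 10 + d
--     return result
-- ===== Notes on version B (the rewrite author's own statement) =====
-- stated objective: alternative
-- what changed: B drops A's destructive loop that mutates a, b and mask: it reads each output digit directly by position with a random-access formula ((operand // 10**index) % 10, selecting the operand by (mask >> i) & 1 and the index by a prefix popcount of the mask) and assembles the result most-significant-first, never updating any operand.
import Mathlib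
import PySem

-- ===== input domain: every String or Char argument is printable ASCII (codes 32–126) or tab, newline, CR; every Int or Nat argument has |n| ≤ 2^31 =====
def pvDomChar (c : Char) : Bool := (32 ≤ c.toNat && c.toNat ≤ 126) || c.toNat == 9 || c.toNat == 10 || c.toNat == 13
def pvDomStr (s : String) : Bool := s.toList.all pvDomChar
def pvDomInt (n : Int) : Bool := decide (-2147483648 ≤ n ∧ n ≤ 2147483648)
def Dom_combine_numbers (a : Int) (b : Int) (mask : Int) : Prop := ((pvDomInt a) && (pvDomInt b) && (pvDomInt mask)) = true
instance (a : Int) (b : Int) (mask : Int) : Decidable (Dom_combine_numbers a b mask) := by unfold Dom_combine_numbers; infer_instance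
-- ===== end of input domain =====

-- B replaces A's destructive sequential loop (mutating a, b, mask) by a mutation-free
-- random-access formula: the digit at each position is read directly via shifts and powers,
-- using a prefix popcount of the mask, and assembled most-significant-first (objective: alternative).

-- ===== PORT A =====
-- while digit_count != requested_count: pick a%10 or b%10 by mask parity, add scaled by
-- 10**digit_count, floor-divide the chosen operand and the mask; n = remaining iterations.
def combineLoopA (a b mask result : Int) (digit_count : Nat) : Nat → Int
  | 0 => result
  | n + 1 =>
    if PySem.Int.mod mask 2 = 0 then
      combineLoopA (PySem.Int.floordiv a 10) b (PySem.Int.floordiv mask 2)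
        (result + PySem.Int.mod a 10 * 10 ^ digit_count) (digit_count + 1) n
    else
      combineLoopA a (PySem.Int.floordiv b 10) (PySem.Int.floordiv mask 2)
        (result + PySem.Int.mod b 10 * 10 ^ digit_count) (digit_count + 1) n

def combine_numbers (a : Int) (b : Int) (mask : Int) : Int :=
  combineLoopA a b mask 0 0
    ((PySem.Str.len (PySem.Int.toStr a) + PySem.Str.len (PySem.Int.toStr b)).toNat)

-- ===== PORT B =====
-- (mask >> i) & 1  — Python's arithmetic shift is Lean's '>>>' on Int, '& 1' is PySem.Int.band
def pyBit (mask : Int) (i : Nat) : Int := PySem.Int.band (mask >>> i) 1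

-- k = sum(1 for j in range(i) if (mask >> j) & 1)
def onesBelow (mask : Int) (i : Nat) : Nat :=
  ((List.range i).filter (fun j => decide (pyBit mask j ≠ 0))).length

-- (x // 10 ** j) % 10
def digitAt (x : Int) (j : Nat) : Int :=
  PySem.Int.mod (PySem.Int.floordiv x ((10 : Int) ^ j)) 10

-- for i in range(n-1, -1, -1): result = result*10 + d  — ported as a fold over the reversed range
def combine_numbers_alt (a : Int) (b : Int) (mask : Int) : Int :=
  let n := ((PySem.Str.len (PySem.Int.toStr a) + PySem.Str.len (PySem.Int.toStr b))).toNat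
  (List.range n).reverse.foldl
    (fun r i =>
      r * 10 +
        (if pyBit mask i ≠ 0 then digitAt b (onesBelow mask i)
         else digitAt a (i - onesBelow mask i))) 0

-- ===== PRECONDITION & SPEC =====
def Spec_combine_numbers (a : Int) (b : Int) (mask : Int) (out : Int) : Prop := out = combine_numbers_alt a b mask
instance (a : Int) (b : Int) (mask : Int) (out : Int) : Decidable (Spec_combine_numbers a b mask out) := by unfold Spec_combine_numbers; infer_instance

-- ===== CLAIM (what is proved, stated in full; the proofs are below) =====
def Claim_equal_combine_numbers : Prop := ∀ (a : Int) (b : Int) (mask : Int), Dom_combine_numbers a b mask → Spec_combine_numbers a b mask (combine_numbers a b mask)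

-- ===== LEMMAS AND PROOFS =====

-- the digit A's loop emits at position i, expressed by B's random-access formula
def digAt (a b mask : Int) (i : Nat) : Int :=
  if pyBit mask i ≠ 0 then digitAt b (onesBelow mask i)
  else digitAt a (i - onesBelow mask i)

-- the little-endian digit stream A's loop consumes
def collectDigits (a b mask : Int) : Nat → List Int
  | 0 => []
  | n + 1 =>
    if PySem.Int.mod mask 2 = 0 then
      PySem.Int.mod a 10 :: collectDigits (PySem.Int.floordiv a 10) b (PySem.Int.floordiv mask 2) n
    else
      PySem.Int.mod b 10 :: collectDigits a (PySem.Int.floordiv b 10) (PySem.Int.floordiv mask 2) n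

-- positional value of a little-endian digit list
def digitsVal : List Int → Int
  | [] => 0
  | d :: ds => d + 10 * digitsVal ds

theorem horner_reverse_eq (l : List Int) :
    ∀ acc : Int, l.reverse.foldl (fun r d => r * 10 + d) acc = acc * 10 ^ l.length + digitsVal l := by
  induction l with
  | nil => intro acc; simp [digitsVal]
  | cons d ds ih =>
    intro acc
    simp only [List.reverse_cons, List.foldl_append, List.foldl_cons, List.foldl_nil, ih,
      digitsVal, List.length_cons]
    ring

theorem combineLoopA_eq (n : Nat) :
    ∀ (a b mask result : Int) (dc : Nat),
      combineLoopA a b mask result dc n = result + 10 ^ dc * digitsVal (collectDigits a b mask n) := by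
  induction n with
  | zero => intro a b mask result dc; simp [combineLoopA, collectDigits, digitsVal]
  | succ n ih =>
    intro a b mask result dc
    simp only [combineLoopA, collectDigits]
    split <;> · rw [ih]; simp [digitsVal, pow_succ]; ring

theorem pyBit_zero (m : Int) : pyBit m 0 = PySem.Int.mod m 2 := by
  simp [pyBit, PySem.Int.band_one]

theorem shiftRight_succ_floordiv (m : Int) (i : Nat) :
    m >>> (i + 1) = (PySem.Int.floordiv m 2) >>> i := by
  rw [PySem.Int.floordiv_eq_ediv_of_pos (by norm_num : (0:Int) < 2)]
  simp only [Int.shiftRight_eq_div_pow]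
  push_cast
  rw [Int.ediv_ediv_of_nonneg (by norm_num : (0:Int) ≤ 2), ← pow_succ']

theorem pyBit_succ (m : Int) (i : Nat) :
    pyBit m (i + 1) = pyBit (PySem.Int.floordiv m 2) i := by
  simp [pyBit, shiftRight_succ_floordiv]

theorem digitAt_zero (x : Int) : digitAt x 0 = PySem.Int.mod x 10 := by
  simp [digitAt]

theorem digitAt_succ (x : Int) (j : Nat) :
    digitAt (PySem.Int.floordiv x 10) j = digitAt x (j + 1) := by
  simp only [digitAt]
  rw [PySem.Int.floordiv_eq_ediv_of_pos (by norm_num : (0:Int) < 10),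
      PySem.Int.floordiv_eq_ediv_of_pos (b := (10:Int) ^ j) (by positivity),
      PySem.Int.floordiv_eq_ediv_of_pos (b := (10:Int) ^ (j+1)) (by positivity),
      Int.ediv_ediv_of_nonneg (by norm_num : (0:Int) ≤ 10), ← pow_succ']

theorem onesBelow_le (m : Int) (i : Nat) : onesBelow m i ≤ i := by
  calc ((List.range i).filter (fun j => decide (pyBit m j ≠ 0))).length
      ≤ (List.range i).length := List.length_filter_le _ _
    _ = i := List.length_range

theorem onesBelow_shift (m : Int) (i : Nat) :
    (((List.range i).map Nat.succ).filter (fun j => decide (pyBit m j ≠ 0))).length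
      = onesBelow (PySem.Int.floordiv m 2) i := by
  rw [List.filter_map, List.length_map]
  unfold onesBelow
  congr 1
  apply List.filter_congr
  intro j _
  simp [Function.comp, pyBit_succ]

theorem onesBelow_succ_even (m : Int) (i : Nat) (h : PySem.Int.mod m 2 = 0) :
    onesBelow m (i + 1) = onesBelow (PySem.Int.floordiv m 2) i := by
  have h0 : decide (pyBit m 0 ≠ 0) = false := by
    simp only [pyBit_zero, h]
    decide
  unfold onesBelow
  rw [List.range_succ_eq_map, List.filter_cons, h0, if_neg (by decide)]
  exact onesBelow_shift m i

theorem onesBelow_succ_odd (m : Int) (i : Nat) (h : PySem.Int.mod m 2 = 1) :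
    onesBelow m (i + 1) = onesBelow (PySem.Int.floordiv m 2) i + 1 := by
  have h0 : decide (pyBit m 0 ≠ 0) = true := by
    simp only [pyBit_zero, h]
    decide
  unfold onesBelow
  rw [List.range_succ_eq_map, List.filter_cons, h0, if_pos rfl, List.length_cons]
  rw [show (((List.range i).map Nat.succ).filter (fun j => decide (pyBit m j ≠ 0))).length
        = onesBelow (PySem.Int.floordiv m 2) i from onesBelow_shift m i]
  rfl

theorem digAt_zero_even (a b m : Int) (h : PySem.Int.mod m 2 = 0) :
    digAt a b m 0 = PySem.Int.mod a 10 := by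
  unfold digAt
  rw [if_neg (by rw [pyBit_zero, h]; decide)]
  simp [onesBelow, digitAt_zero]

theorem digAt_zero_odd (a b m : Int) (h : PySem.Int.mod m 2 = 1) :
    digAt a b m 0 = PySem.Int.mod b 10 := by
  unfold digAt
  rw [if_pos (by rw [pyBit_zero, h]; decide)]
  simp [onesBelow, digitAt_zero]

theorem digAt_succ_even (a b m : Int) (i : Nat) (h : PySem.Int.mod m 2 = 0) :
    digAt a b m (i + 1) = digAt (PySem.Int.floordiv a 10) b (PySem.Int.floordiv m 2) i := by
  unfold digAt
  rw [pyBit_succ, onesBelow_succ_even m i h]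
  by_cases hb : pyBit (PySem.Int.floordiv m 2) i ≠ 0
  · rw [if_pos hb, if_pos hb]
  · rw [if_neg hb, if_neg hb, Nat.succ_sub (onesBelow_le _ _), digitAt_succ]

theorem digAt_succ_odd (a b m : Int) (i : Nat) (h : PySem.Int.mod m 2 = 1) :
    digAt a b m (i + 1) = digAt a (PySem.Int.floordiv b 10) (PySem.Int.floordiv m 2) i := by
  unfold digAt
  rw [pyBit_succ, onesBelow_succ_odd m i h]
  by_cases hb : pyBit (PySem.Int.floordiv m 2) i ≠ 0
  · rw [if_pos hb, if_pos hb, digitAt_succ]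
  · rw [if_neg hb, if_neg hb, Nat.succ_sub_succ]

theorem collectDigits_eq (n : Nat) :
    ∀ a b mask : Int, collectDigits a b mask n = (List.range n).map (digAt a b mask) := by
  induction n with
  | zero => intro a b mask; simp [collectDigits]
  | succ n ih =>
    intro a b mask
    rw [List.range_succ_eq_map, List.map_cons, List.map_map]
    rcases PySem.Int.mod_two_eq mask with h | h
    · simp only [collectDigits, if_pos h]
      congr 1
      · rw [digAt_zero_even a b mask h]
      · rw [ih]
        apply List.map_congr_left
        intro j _
        simp only [Function.comp_apply]
        rw [digAt_succ_even a b mask j h]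
    · simp only [collectDigits, if_neg (by omega : ¬ PySem.Int.mod mask 2 = 0)]
      congr 1
      · rw [digAt_zero_odd a b mask h]
      · rw [ih]
        apply List.map_congr_left
        intro j _
        simp only [Function.comp_apply]
        rw [digAt_succ_odd a b mask j h]

-- ===== VERDICT (by name: the statement is the Claim_ definition above) =====
theorem combine_numbers_spec : Claim_equal_combine_numbers := by
  intro a b mask _
  unfold Spec_combine_numbers combine_numbers combine_numbers_alt
  rw [combineLoopA_eq]
  show 0 + 10 ^ 0 * digitsVal _ =
    (List.range _).reverse.foldl (fun r i => r * 10 + digAt a b mask i) 0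
  rw [← List.foldl_map (f := digAt a b mask) (g := fun r d => r * 10 + d),
      List.map_reverse, horner_reverse_eq, collectDigits_eq]
  simp
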